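-- pv_equiv track=rewrite | github.com/Zechen6/FFC-FastFourierCorrelation | Heatwave/HumBugDB/reverse_mel.py | get_index_mapping
-- ===== SOURCE A (Python) =====
-- def get_index_mapping(idx, records):
--     """
--     将扁平化 idx 映射回 (patient_id, segment_id)
--     records: list of list of segments per patient
--     idx: 整体扁平化的索引
--     """
--     index_map = []
--     for p_id, seg_list in enumerate(records):
--         for s_id in range(len(seg_list)):
--             index_map.append((p_id, s_id))
--
--     if idx < 0 or idx >= len(index_map):
--         raise ValueError(f"idx {idx} out of range. Total segments={len(index_map)}")
--
--     return index_map[idx]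
-- ===== SOURCE B (Python) =====
-- def get_index_mapping(idx, records):
--     """
--     将扁平化 idx 映射回 (patient_id, segment_id)
--     records: list of list of segments per patient
--     idx: 整体扁平化的索引
--     """
--     if idx >= 0:
--         rem = idx
--         for p_id, seg_list in enumerate(records):
--             n = len(seg_list)
--             if rem < n:
--                 return (p_id, rem)
--             rem -= n
--     total = sum(len(seg_list) for seg_list in records)
--     raise ValueError(f"idx {idx} out of range. Total segments={total}")
-- ===== Notes on version B (the rewrite author's own statement) =====
-- stated objective: faster
-- what changed: Instead of materialising the full flat list of (patient, segment) pairs and indexing into it, B walks the patient list once subtracting each patient's segment count from the index, so no O(total_segments) list is built.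
import Mathlib
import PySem

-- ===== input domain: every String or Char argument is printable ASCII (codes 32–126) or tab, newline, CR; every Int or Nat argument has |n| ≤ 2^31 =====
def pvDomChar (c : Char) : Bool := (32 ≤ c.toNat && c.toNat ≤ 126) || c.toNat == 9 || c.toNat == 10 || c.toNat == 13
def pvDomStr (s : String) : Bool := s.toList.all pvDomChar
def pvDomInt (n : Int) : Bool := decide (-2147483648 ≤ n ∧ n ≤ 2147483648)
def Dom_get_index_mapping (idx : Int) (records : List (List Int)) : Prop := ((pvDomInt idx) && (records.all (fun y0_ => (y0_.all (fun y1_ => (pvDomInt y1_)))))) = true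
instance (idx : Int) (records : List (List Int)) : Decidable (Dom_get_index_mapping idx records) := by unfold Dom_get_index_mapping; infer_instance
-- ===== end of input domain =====

-- B replaces A's materialised flat index list by a single subtracting walk over the patients (faster: one pass, no list).
-- The Python return tuple (p_id, s_id) is rendered as the two-element list [p_id, s_id].

-- ===== PORT A =====
def get_index_mapping (idx : Int) (records : List (List Int)) : List Int :=
  -- index_map built by the nested loops, one appended pair at a time
  let index_map : List (List Int) :=
    (PySem.List.enumerate records 0).foldl
      (fun acc p =>
        (PySem.List.pyRange 0 (p.2.length : Int) 1).foldl
          (fun acc2 s => acc2 ++ [[p.1, s]]) acc) []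
  if idx < 0 ∨ (index_map.length : Int) ≤ idx then []  -- Python raises ValueError here; excluded by Pre_
  else PySem.List.pyGetD index_map idx []

-- ===== PORT B =====
def getIndexMappingGo (p rem : Int) : List (List Int) → List Int
  | [] => []  -- Python raises ValueError here; excluded by Pre_
  | seg :: rest =>
    if rem < (seg.length : Int) then [p, rem]
    else getIndexMappingGo (p + 1) (rem - seg.length) rest

def get_index_mapping_alt (idx : Int) (records : List (List Int)) : List Int :=
  if 0 ≤ idx then getIndexMappingGo 0 idx records
  else []  -- Python raises ValueError here; excluded by Pre_

-- ===== PRECONDITION & SPEC =====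
-- Pre_ excludes exactly the inputs on which A raises ValueError: idx out of [0, total segments).
def Pre_get_index_mapping (idx : Int) (records : List (List Int)) : Prop :=
  0 ≤ idx ∧ idx < ((records.map List.length).sum : Int)
instance (idx : Int) (records : List (List Int)) : Decidable (Pre_get_index_mapping idx records) := by
  unfold Pre_get_index_mapping; infer_instance
def pvWitness_get_index_mapping : Int × List (List Int) := (3, [[7], [1, 2], [], [4, 5]])

def Spec_get_index_mapping (idx : Int) (records : List (List Int)) (out : List Int) : Prop := out = get_index_mapping_alt idx records
instance (idx : Int) (records : List (List Int)) (out : List Int) : Decidable (Spec_get_index_mapping idx records out) := by unfold Spec_get_index_mapping; infer_instance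

-- ===== CLAIM (what is proved, stated in full; the proofs are below) =====
def Claim_equal_get_index_mapping : Prop := ∀ (idx : Int) (records : List (List Int)), Dom_get_index_mapping idx records → Pre_get_index_mapping idx records → Spec_get_index_mapping idx records (get_index_mapping idx records)

-- ===== LEMMAS AND PROOFS =====

-- the flat map A builds, in closed flatMap form
def flatBlocks (records : List (List Int)) (start : Int) : List (List Int) :=
  (PySem.List.enumerate records start).flatMap
    (fun p => (PySem.List.pyRange 0 (p.2.length : Int) 1).map (fun s => [p.1, s]))

lemma foldA_eq_flatBlocks (records : List (List Int)) (start : Int) (acc : List (List Int)) :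
    (PySem.List.enumerate records start).foldl
      (fun acc p =>
        (PySem.List.pyRange 0 (p.2.length : Int) 1).foldl
          (fun acc2 s => acc2 ++ [[p.1, s]]) acc) acc = acc ++ flatBlocks records start := by
  induction records generalizing start acc with
  | nil => simp [flatBlocks, PySem.List.enumerate_nil]
  | cons seg rest ih =>
      simp only [flatBlocks, PySem.List.enumerate_cons, List.foldl_cons, List.flatMap_cons]
      rw [PySem.List.foldl_append_singleton_eq_map, ih]
      simp [flatBlocks, List.append_assoc]

lemma flatBlocks_length (records : List (List Int)) (start : Int) :
    (flatBlocks records start).length = (records.map List.length).sum := by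
  induction records generalizing start with
  | nil => simp [flatBlocks, PySem.List.enumerate_nil]
  | cons seg rest ih =>
      simp [flatBlocks, PySem.List.enumerate_cons] at *
      simp [ih]

lemma lookup_flatBlocks (records : List (List Int)) (start idx : Int)
    (h0 : 0 ≤ idx) (h : idx < ((records.map List.length).sum : Int)) :
    PySem.List.pyGetD (flatBlocks records start) idx [] = getIndexMappingGo start idx records := by
  induction records generalizing start idx with
  | nil => simp at h; omega
  | cons seg rest ih =>
      have hblock : ((PySem.List.pyRange 0 (seg.length : Int) 1).map
          (fun s => [start, s])).length = seg.length := by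
        simp [PySem.List.length_pyRange_one]
      have hrestlen : (flatBlocks rest (start + 1)).length = (rest.map List.length).sum :=
        flatBlocks_length rest (start + 1)
      have hsum : ((seg :: rest).map List.length).sum = seg.length + (rest.map List.length).sum := by
        simp
      rw [hsum] at h
      push_cast at h
      simp only [flatBlocks, PySem.List.enumerate_cons, List.flatMap_cons]
      rw [show List.flatMap (fun p => List.map (fun s => [p.1, s])
            (PySem.List.pyRange 0 (p.2.length : Int) 1)) (PySem.List.enumerate rest (start + 1))
          = flatBlocks rest (start + 1) from rfl]
      rw [getIndexMappingGo]
      have hlen : (((PySem.List.pyRange 0 (seg.length : Int) 1).map (fun s => [start, s])) ++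
          flatBlocks rest (start + 1)).length = seg.length + (rest.map List.length).sum := by
        rw [List.length_append, hblock, hrestlen]
      by_cases hc : idx < (seg.length : Int)
      · rw [if_pos hc]
        rw [PySem.List.pyGetD_eq_getElem _ _ h0 (by rw [hlen]; push_cast; omega)]
        rw [List.getElem_append_left (by rw [hblock]; omega)]
        simp [PySem.List.getElem_pyRange_one]
        omega
      · rw [if_neg hc]
        have hrest := ih (start + 1) (idx - seg.length) (by omega) (by push_cast; omega)
        rw [← hrest]
        rw [PySem.List.pyGetD_eq_getElem _ _ h0 (by rw [hlen]; push_cast; omega)]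
        rw [PySem.List.pyGetD_eq_getElem _ _ (by omega) (by rw [hrestlen]; push_cast; omega)]
        rw [List.getElem_append_right (by rw [hblock]; omega)]
        congr 1
        rw [hblock]
        omega

-- ===== VERDICT (by name: the statement is the Claim_ definition above) =====
theorem get_index_mapping_spec : Claim_equal_get_index_mapping := by
  intro idx records _ hpre
  obtain ⟨h0, hlt⟩ := hpre
  unfold Spec_get_index_mapping get_index_mapping get_index_mapping_alt
  rw [foldA_eq_flatBlocks]
  simp only [List.nil_append]
  rw [if_neg (by rw [flatBlocks_length]; omega), if_pos h0]
  exact lookup_flatBlocks records 0 idx h0 hlt
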